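-- pv_equiv track=rewrite | github.com/neelkantnewra/Python-for-Everybody | Competition/placementQuestion.py | solve
-- ===== SOURCE A (Python) =====
-- def minsubarray(arr):
--     ans = []
--     for i in range(0,len(arr)):
--         ans.append(abs(sum(arr[0:i]) - sum(arr[i:])))
--     return min(ans)
--
-- def solve(N,Q,A,query):
--     solution = []
--     for q in query:
--         array = A[:]
--         if q[0] == 1:
--             for i in range(0,q[1]):
--                 array.insert(0,array[-1])
--                 del array[-1]
--         else:
--             for i in range(0,q[1]):
--                 array.append(array[0])
--                 del array[0]
--
--         solution.append(minsubarray(array))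
--
--     return solution
-- ===== SOURCE B (Python) =====
-- def solve(N, Q, A, query):
--     n = len(A)
--     out = []
--     for q in query:
--         s = max(q[1], 0) % n
--         if q[0] == 1:
--             r = A[n - s:] + A[:n - s]
--         else:
--             r = A[s:] + A[:s]
--         total = sum(r)
--         run = 0
--         best = abs(total)
--         for x in r[:-1]:
--             run += x
--             d = abs(2 * run - total)
--             if d < best:
--                 best = d
--         out.append(best)
--     return out
-- ===== Notes on version B (the rewrite author's own statement) =====
-- stated objective: faster
-- what changed: B replaces A's per-query q[1] single-step rotation loop and the quadratic minsubarray (which re-sums both halves for every split point) with one slice rotation by q[1] mod N and a single running-prefix-sum pass minimizing |2*prefix - total|.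
-- outside the precondition, e.g. on solve(0, 0, [], []): A returns [], B returns []; on solve(1, 1, [], [[1, 1]]): A raises IndexError, B raises ZeroDivisionError; on solve(2, 1, [1, 2], [[1]]): A raises IndexError, B raises IndexError
import Mathlib
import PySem

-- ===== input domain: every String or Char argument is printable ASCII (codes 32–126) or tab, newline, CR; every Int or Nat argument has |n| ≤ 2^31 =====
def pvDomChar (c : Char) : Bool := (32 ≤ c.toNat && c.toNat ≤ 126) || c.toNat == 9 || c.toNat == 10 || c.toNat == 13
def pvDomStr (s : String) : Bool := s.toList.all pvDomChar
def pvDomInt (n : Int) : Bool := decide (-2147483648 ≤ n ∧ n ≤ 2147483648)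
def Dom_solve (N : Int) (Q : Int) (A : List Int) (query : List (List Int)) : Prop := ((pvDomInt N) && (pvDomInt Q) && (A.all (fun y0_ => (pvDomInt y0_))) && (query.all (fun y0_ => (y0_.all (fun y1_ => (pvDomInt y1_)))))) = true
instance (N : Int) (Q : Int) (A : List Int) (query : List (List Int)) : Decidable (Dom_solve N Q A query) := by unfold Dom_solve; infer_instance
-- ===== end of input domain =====

-- B replaces A's per-query element-by-element rotation loop (q[1] single steps) and the
-- quadratic minsubarray (re-summing both sides for every split) by a single slice rotation
-- of q[1] mod N and one running-prefix-sum pass: O(Q·N) instead of O(Q·(q1·N + N²)).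

-- ===== PORT A =====
def minsubarrayA (arr : List Int) : Option Int :=
  let ans := (PySem.List.pyRange 0 (PySem.List.len arr) 1).foldl
    (fun acc i => acc ++ [|(PySem.List.slice arr (some 0) (some i)).sum
                          - (PySem.List.slice arr (some i) none).sum|]) []
  PySem.List.min? ans (fun x => x)

-- array.insert(0, array[-1]); del array[-1]   (empty array = IndexError, excluded by Pre_)
def rotStepR (l : List Int) : List Int :=
  match PySem.List.pyGet? l (-1) with
  | none => l
  | some x => (x :: l).dropLast

-- array.append(array[0]); del array[0]
def rotStepL (l : List Int) : List Int :=
  match PySem.List.pyGet? l 0 with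
  | none => l
  | some x => (l ++ [x]).drop 1

def perQueryA (A : List Int) (q : List Int) : Int :=
  let array := A
  let array :=
    if PySem.List.pyGetD q 0 0 = 1 then
      (PySem.List.pyRange 0 (PySem.List.pyGetD q 1 0) 1).foldl (fun ar _ => rotStepR ar) array
    else
      (PySem.List.pyRange 0 (PySem.List.pyGetD q 1 0) 1).foldl (fun ar _ => rotStepL ar) array
  (minsubarrayA array).getD 0

def solve (N : Int) (Q : Int) (A : List Int) (query : List (List Int)) : List Int :=
  query.foldl (fun sol q => sol ++ [perQueryA A q]) []

-- ===== PORT B =====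
def minDiffB (r : List Int) : Int :=
  let total := r.sum
  ((PySem.List.slice r none (some (-1))).foldl
    (fun (st : Int × Int) x =>
      let run := st.1 + x
      let d := |2 * run - total|
      (run, if d < st.2 then d else st.2)) (0, |total|)).2

def perQueryB (n : Int) (A : List Int) (q : List Int) : Int :=
  let s := PySem.Int.mod (max (PySem.List.pyGetD q 1 0) 0) n
  let r :=
    if PySem.List.pyGetD q 0 0 = 1 then
      PySem.List.slice A (some (n - s)) none ++ PySem.List.slice A none (some (n - s))
    else
      PySem.List.slice A (some s) none ++ PySem.List.slice A none (some s)
  minDiffB r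

def solve_alt (N : Int) (Q : Int) (A : List Int) (query : List (List Int)) : List Int :=
  query.foldl (fun out q => out ++ [perQueryB (PySem.List.len A) A q]) []

-- ===== PRECONDITION & SPEC =====
-- Pre_ excludes the inputs where Python A raises: an empty A (min() of an empty list /
-- array[-1] IndexError) and a query row with fewer than two entries (IndexError). The
-- conditions are required even when query = [] (where A trivially returns []), so a few
-- degenerate returning inputs such as (0, 0, [], []) are also excluded.
def Pre_solve (N : Int) (Q : Int) (A : List Int) (query : List (List Int)) : Prop :=
  A ≠ [] ∧ ∀ q ∈ query, 2 ≤ q.length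
instance (N : Int) (Q : Int) (A : List Int) (query : List (List Int)) : Decidable (Pre_solve N Q A query) := by unfold Pre_solve; infer_instance

def pvWitness_solve : Int × Int × List Int × List (List Int) :=
  (3, 2, [1, 2, 3], [[1, 1], [2, 2]])

def Spec_solve (N : Int) (Q : Int) (A : List Int) (query : List (List Int)) (out : List Int) : Prop := out = solve_alt N Q A query
instance (N : Int) (Q : Int) (A : List Int) (query : List (List Int)) (out : List Int) : Decidable (Spec_solve N Q A query out) := by unfold Spec_solve; infer_instance

-- ===== CLAIM (what is proved, stated in full; the proofs are below) =====
def Claim_equal_solve : Prop := ∀ (N : Int) (Q : Int) (A : List Int) (query : List (List Int)), Dom_solve N Q A query → Pre_solve N Q A query → Spec_solve N Q A query (solve N Q A query)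

-- ===== LEMMAS AND PROOFS =====

-- a foldl that ignores the elements is function iteration
theorem foldl_const_iterate {α β : Type} (f : α → α) :
    ∀ (l : List β) (x : α), l.foldl (fun a _ => f a) x = f^[l.length] x := by
  intro l
  induction l with
  | nil => intro x; rfl
  | cons y t ih =>
      intro x
      simp [List.foldl_cons, ih, Function.iterate_succ_apply]

theorem rotStepR_eq_rotate (l : List Int) (h : l ≠ []) :
    rotStepR l = l.rotate (l.length - 1) := by
  unfold rotStepR
  rw [PySem.List.pyGet?_neg_one, List.getLast?_eq_getLast_of_ne_nil h]
  show (l.getLast h :: l).dropLast = _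
  rw [List.dropLast_cons_of_ne_nil h,
      List.rotate_eq_drop_append_take (by omega),
      List.drop_length_sub_one h, ← List.dropLast_eq_take]
  rfl

theorem rotStepL_eq_rotate (l : List Int) (h : l ≠ []) :
    rotStepL l = l.rotate 1 := by
  obtain ⟨a, t, rfl⟩ := List.exists_cons_of_ne_nil h
  unfold rotStepL
  rw [PySem.List.pyGet?_zero_cons]
  simp [List.rotate_cons_succ]

theorem iterR_eq_rotate (A : List Int) (h : A ≠ []) :
    ∀ m : Nat, rotStepR^[m] A = A.rotate (m * (A.length - 1)) := by
  intro m
  induction m with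
  | zero => simp
  | succ m ih =>
      rw [Function.iterate_succ_apply', ih,
          rotStepR_eq_rotate _ (by simpa using h)]
      rw [List.length_rotate, List.rotate_rotate, Nat.succ_mul]

theorem iterL_eq_rotate (A : List Int) (h : A ≠ []) :
    ∀ m : Nat, rotStepL^[m] A = A.rotate m := by
  intro m
  induction m with
  | zero => simp
  | succ m ih =>
      rw [Function.iterate_succ_apply', ih,
          rotStepL_eq_rotate _ (by simpa using h),
          List.rotate_rotate]

-- index arithmetic for the right rotation: m single right steps = left rotation by (n - m%n) % n
theorem rot_mod (m n : Nat) (hn : 0 < n) :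
    (m * (n - 1)) % n = (n - m % n) % n := by
  rw [← Nat.mod_mul_mod]
  rcases Nat.eq_zero_or_pos (m % n) with h0 | hpos
  · simp [h0]
  · have hlt : m % n < n := Nat.mod_lt _ hn
    have h1 : 1 ≤ m % n := hpos
    have hkey : (m % n) * (n - 1) = (n - m % n) + (m % n - 1) * n := by
      zify [h1, hlt.le, hn]
      ring
    rw [hkey, Nat.add_mul_mod_self_right]

-- per-query rotation equality (right)
theorem rotR_eq (A : List Int) (hA : A ≠ []) (k : Int) :
    (PySem.List.pyRange 0 k 1).foldl (fun ar _ => rotStepR ar) A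
      = PySem.List.slice A (some ((A.length : Int) - PySem.Int.mod (max k 0) (A.length : Int))) none
        ++ PySem.List.slice A none (some ((A.length : Int) - PySem.Int.mod (max k 0) (A.length : Int))) := by
  have hmax : max k 0 = ((k.toNat : Nat) : Int) := by rw [Int.ofNat_toNat]
  set n := A.length with hn
  have hn0 : 0 < n := List.length_pos_iff.mpr hA
  set m := k.toNat with hm
  have hs : ((n : Int) - PySem.Int.mod (max k 0) (n : Int)) = ((n - m % n : Nat) : Int) := by
    rw [hmax, PySem.Int.mod_natCast]
    have := Nat.mod_lt m hn0
    push_cast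
    omega
  rw [hs, PySem.List.slice_from_natCast, PySem.List.slice_to_natCast,
      foldl_const_iterate, PySem.List.length_pyRange_one, iterR_eq_rotate A hA]
  have hle : n - m % n ≤ n := Nat.sub_le _ _
  rw [← List.rotate_eq_drop_append_take hle, ← List.rotate_mod, rot_mod _ _ hn0,
      List.rotate_mod]
  simp [hm]

-- per-query rotation equality (left)
theorem rotL_eq (A : List Int) (hA : A ≠ []) (k : Int) :
    (PySem.List.pyRange 0 k 1).foldl (fun ar _ => rotStepL ar) A
      = PySem.List.slice A (some (PySem.Int.mod (max k 0) (A.length : Int))) none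
        ++ PySem.List.slice A none (some (PySem.Int.mod (max k 0) (A.length : Int))) := by
  have hmax : max k 0 = ((k.toNat : Nat) : Int) := by rw [Int.ofNat_toNat]
  set n := A.length with hn
  have hn0 : 0 < n := List.length_pos_iff.mpr hA
  set m := k.toNat with hm
  rw [hmax, PySem.Int.mod_natCast, PySem.List.slice_from_natCast, PySem.List.slice_to_natCast,
      foldl_const_iterate, PySem.List.length_pyRange_one, iterL_eq_rotate A hA]
  have hle : m % n ≤ n := (Nat.mod_lt m hn0).le
  rw [← List.rotate_eq_drop_append_take hle, List.rotate_mod]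
  simp [hm]

-- B's single pass, characterised: the second state component is the running min of the
-- prefix values |2*(p + S_j) - T|
theorem foldB_spec (T : Int) :
    ∀ (xs : List Int) (p b : Int),
      (xs.foldl
        (fun (st : Int × Int) x =>
          let run := st.1 + x
          let d := |2 * run - T|
          (run, if d < st.2 then d else st.2)) (p, b)).2
      = ((List.range xs.length).map (fun j => |2 * (p + (xs.take (j+1)).sum) - T|)).foldl min b := by
  intro xs
  induction xs with
  | nil => intro p b; simp
  | cons x t ih =>
      intro p b
      rw [List.foldl_cons]
      show (t.foldl _ (p + x, if |2*(p+x) - T| < b then |2*(p+x) - T| else b)).2 = _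
      rw [ih]
      have hrange : List.range (x :: t).length = 0 :: (List.range t.length).map (·+1) := by
        simpa using List.range_succ_eq_map (n := t.length)
      rw [hrange]
      simp only [List.map_cons, List.map_map, List.foldl_cons]
      congr 1
      · simp only [zero_add, List.take_succ_cons, List.take_zero, List.sum_cons,
          List.sum_nil, add_zero]
        omega
      · refine List.map_congr_left fun j hj => ?_
        simp [Function.comp, List.take_succ_cons, add_assoc]

-- minsubarray of a nonempty list equals B's one-pass min
theorem slice_ne_nil_of_rot (A : List Int) (hA : A ≠ []) (c : Int) (h0 : 0 ≤ c) :
    PySem.List.slice A (some c) none ++ PySem.List.slice A none (some c) ≠ [] := by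
  rw [PySem.List.slice_from A h0, PySem.List.slice_to A h0]
  intro hcontra
  rcases List.append_eq_nil_iff.mp hcontra with ⟨h1, h2⟩
  rcases List.take_eq_nil_iff.mp h2 with h | h
  · rw [h] at h1; simp at h1; exact hA h1
  · exact hA h

theorem mins_eq (r : List Int) (h : r ≠ []) :
    (minsubarrayA r).getD 0 = minDiffB r := by
  obtain ⟨n', hn⟩ : ∃ n', r.length = n' + 1 :=
    ⟨r.length - 1, by have := List.length_pos_iff.mpr h; omega⟩
  -- A's value list is the split values |2·prefix − total|
  have hA : minsubarrayA r
      = PySem.List.min? ((List.range r.length).map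
          (fun k => |2 * (r.take k).sum - r.sum|)) (fun x => x) := by
    unfold minsubarrayA
    rw [PySem.List.foldl_append_singleton_eq_map]
    simp only [List.nil_append, PySem.List.len_eq, PySem.List.pyRange_one, Int.sub_zero,
      Int.toNat_natCast, List.map_map]
    congr 1
    refine List.map_congr_left fun k hk => ?_
    simp only [Function.comp_apply, zero_add, PySem.List.slice_zero_start,
      PySem.List.slice_to_natCast, PySem.List.slice_from_natCast]
    have hsd := List.sum_take_add_sum_drop r k
    congr 1
    omega
  have hrange : List.range r.length = 0 :: (List.range n').map (·+1) := by
    rw [hn]; simpa using List.range_succ_eq_map (n := n')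
  rw [hA, hrange]
  simp only [List.map_cons, List.map_map, List.take_zero, List.sum_nil]
  rw [PySem.List.min?_id_cons, Option.getD_some]
  -- B's single pass over r[:-1]
  unfold minDiffB
  simp only [PySem.List.slice_to_neg_one]
  rw [foldB_spec]
  have hlen : r.dropLast.length = n' := by simp [hn]
  rw [hlen]
  congr 1
  · have : 2 * (0:Int) - r.sum = -r.sum := by ring
    rw [this, abs_neg]
  · refine (List.map_congr_left fun j hj => ?_).symm
    have hj' : j < n' := List.mem_range.mp hj
    have htake : r.dropLast.take (j+1) = r.take (j+1) := by
      rw [List.dropLast_eq_take, List.take_take]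
      congr 1
      omega
    simp [Function.comp, htake]

theorem perQuery_eq (A : List Int) (q : List Int) (hA : A ≠ []) :
    perQueryA A q = perQueryB (PySem.List.len A) A q := by
  have hpos : (0:Int) < (A.length : Int) := by
    exact_mod_cast List.length_pos_iff.mpr hA
  unfold perQueryA perQueryB
  simp only [PySem.List.len_eq]
  by_cases h0 : PySem.List.pyGetD q 0 0 = 1
  · simp only [if_pos h0]
    rw [rotR_eq A hA]
    refine mins_eq _ (slice_ne_nil_of_rot A hA _ ?_)
    have := PySem.Int.mod_lt (max (PySem.List.pyGetD q 1 0) 0) hpos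
    omega
  · simp only [if_neg h0]
    rw [rotL_eq A hA]
    exact mins_eq _ (slice_ne_nil_of_rot A hA _ (PySem.Int.mod_nonneg _ hpos))

-- ===== VERDICT (by name: the statement is the Claim_ definition above) =====
theorem solve_spec : Claim_equal_solve := by
  intro N Q A query _ hpre
  unfold Spec_solve solve solve_alt
  rw [PySem.List.foldl_append_singleton_eq_map, PySem.List.foldl_append_singleton_eq_map]
  simp only [List.nil_append]
  exact List.map_congr_left (fun q _ => perQuery_eq A q hpre.1)
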